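-- pv_equiv track=rewrite | github.com/Insper/bits-e-proc-tools | bits/sw/simulator/asm_utils.py | real_line
-- ===== SOURCE A (Python) =====
-- def real_line(contents, pc):
--     pc = pc - 1 ##TODO Bug
--     instr_counter = 0
--     line_counter = 0
--     for line in contents.split('\n'):
--         line = line.strip().replace('  ', ' ')
--         if ':' in line or line == '' or (len(line) >= 1 and line[0] == ';'):
--             line_counter += 1
--             continue
--
--         if instr_counter == pc:
--             break
--         else:
--             instr_counter += 1
--             line_counter += 1
--     return line_counter
-- ===== SOURCE B (Python) =====
-- def _is_instruction(raw):
--     line = raw.strip().replace('  ', ' ')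
--     return not (':' in line or line == '' or line.startswith(';'))
--
--
-- def real_line(contents, pc):
--     pc = pc - 1
--     lines = contents.split('\n')
--     instr_indices = [i for i, raw in enumerate(lines) if _is_instruction(raw)]
--     if 0 <= pc < len(instr_indices):
--         return instr_indices[pc]
--     return len(lines)
-- ===== Notes on version B (the rewrite author's own statement) =====
-- stated objective: alternative
-- what changed: Replaces A's single counting scan with an early break by building the list of instruction-line positions once (enumerate+filter) and then answering with a direct positional lookup, falling back to the total line count when pc-1 is out of range.
import Mathlib
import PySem

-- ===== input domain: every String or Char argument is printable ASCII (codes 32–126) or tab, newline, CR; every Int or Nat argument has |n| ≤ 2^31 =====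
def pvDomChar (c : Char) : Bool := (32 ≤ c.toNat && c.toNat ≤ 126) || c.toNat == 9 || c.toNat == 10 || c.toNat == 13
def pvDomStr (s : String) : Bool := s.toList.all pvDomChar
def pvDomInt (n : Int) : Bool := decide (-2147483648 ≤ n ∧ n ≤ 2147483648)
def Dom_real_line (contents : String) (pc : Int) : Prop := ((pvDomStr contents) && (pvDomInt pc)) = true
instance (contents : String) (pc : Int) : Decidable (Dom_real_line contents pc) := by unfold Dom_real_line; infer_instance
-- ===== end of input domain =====

-- B replaces A's counting scan with an early break by one index-building pass plus a direct
-- positional lookup (objective: alternative decomposition; same asymptotic cost).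

-- ===== PORT A =====
-- A's loop: for each line, normalise; non-instruction lines bump line_counter; at the pc-th
-- instruction line break (return line_counter), else bump both counters.
def realLineLoop (pc : Int) : List String → Int → Int → Int
  | [], _, lc => lc
  | raw :: rest, instr, lc =>
    let line := PySem.Str.replace (PySem.Str.strip raw) "  " " "
    if PySem.Str.isIn ":" line || (line == "") ||
        (decide (1 ≤ PySem.Str.len line) && (PySem.Str.pyGet? line 0 == some ';')) then
      realLineLoop pc rest instr (lc + 1)
    else if instr == pc then lc
    else realLineLoop pc rest (instr + 1) (lc + 1)

def real_line (contents : String) (pc : Int) : Int :=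
  -- contents.split('\n'): sep ≠ "" so split? is always some; getD never takes the default
  realLineLoop (pc - 1) ((PySem.Str.split? contents "\n").getD []) 0 0

-- ===== PORT B =====
def isInstruction (raw : String) : Bool :=
  let line := PySem.Str.replace (PySem.Str.strip raw) "  " " "
  !(PySem.Str.isIn ":" line || (line == "") || PySem.Str.startswith line ";")

def real_line_alt (contents : String) (pc : Int) : Int :=
  let pc' := pc - 1
  let lines := (PySem.Str.split? contents "\n").getD []
  let idxs := ((PySem.List.enumerate lines).filter (fun p => isInstruction p.2)).map (fun p => p.1)
  if 0 ≤ pc' ∧ pc' < (idxs.length : Int) then PySem.List.pyGetD idxs pc' 0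
  else (lines.length : Int)

-- ===== PRECONDITION & SPEC =====
def Spec_real_line (contents : String) (pc : Int) (out : Int) : Prop := out = real_line_alt contents pc
instance (contents : String) (pc : Int) (out : Int) : Decidable (Spec_real_line contents pc out) := by unfold Spec_real_line; infer_instance

-- ===== CLAIM (what is proved, stated in full; the proofs are below) =====
def Claim_equal_real_line : Prop := ∀ (contents : String) (pc : Int), Dom_real_line contents pc → Spec_real_line contents pc (real_line contents pc)

-- ===== LEMMAS AND PROOFS =====

theorem semi_test_chars (cs : List Char) :
    (decide (1 ≤ ((cs.length : Int))) && (PySem.List.pyGet? cs 0 == some ';'))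
      = PySem.Chars.startswith cs [';'] := by
  cases cs with
  | nil => simp [PySem.Chars.startswith, PySem.List.pyGet?, PySem.List.pyIdx?]
  | cons c cs =>
    have h1 : (1:Int) ≤ ((c :: cs).length : Int) := by
      push_cast [List.length_cons]
      omega
    simp only [PySem.Chars.startswith, PySem.List.pyGet?, PySem.List.pyIdx?, List.isPrefixOf,
      h1, decide_true, Bool.true_and]
    by_cases hc : c = ';'
    · simp [hc]
    · simp only [List.length_cons]
      simp [hc]
      exact fun e => hc e.symm

-- A's spelled-out ';'-prefix test coincides with B's startswith.
theorem semi_test_eq (line : String) :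
    (decide (1 ≤ PySem.Str.len line) && (PySem.Str.pyGet? line 0 == some ';'))
      = PySem.Str.startswith line ";" := by
  simp only [PySem.Str.len_eq, PySem.Str.pyGet?_eq, PySem.Chars.pyGet?_eq_listPyGet?,
    PySem.Str.startswith_eq]
  simpa using semi_test_chars line.toList

-- relative positions (0-based, as Ints) of the instruction lines
def instrIdxs : List String → List Int
  | [] => []
  | raw :: rest =>
    if isInstruction raw then 0 :: (instrIdxs rest).map (· + 1)
    else (instrIdxs rest).map (· + 1)

-- B's enumerate-filter-map comprehension computes instrIdxs, shifted by the start offset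
theorem enumerate_filter_map_eq (lines : List String) (s : Int) :
    (((PySem.List.enumerate lines s).filter (fun p => isInstruction p.2)).map (fun p => p.1))
      = (instrIdxs lines).map (· + s) := by
  induction lines generalizing s with
  | nil => simp [instrIdxs, PySem.List.enumerate_nil]
  | cons raw rest ih =>
    simp only [PySem.List.enumerate_cons, instrIdxs]
    by_cases h : isInstruction raw = true
    · simp [h, ih (s + 1), List.map_map]
      exact fun a _ => by ring
    · simp only [Bool.not_eq_true] at h
      simp [h, ih (s + 1), List.map_map]
      exact fun a _ => by ring

-- the loop invariant: A's scan from counters (instr, lc) is a positional lookup in instrIdxs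
theorem realLineLoop_eq (lines : List String) (pc instr lc : Int) :
    realLineLoop pc lines instr lc =
      if 0 ≤ pc - instr ∧ pc - instr < ((instrIdxs lines).length : Int)
      then lc + PySem.List.pyGetD (instrIdxs lines) (pc - instr) 0
      else lc + (lines.length : Int) := by
  induction lines generalizing instr lc with
  | nil => simp [realLineLoop, instrIdxs]
  | cons raw rest ih =>
    have hcond : (PySem.Str.isIn ":" (PySem.Str.replace (PySem.Str.strip raw) "  " " ")
        || ((PySem.Str.replace (PySem.Str.strip raw) "  " " ") == "")
        || (decide (1 ≤ PySem.Str.len (PySem.Str.replace (PySem.Str.strip raw) "  " " "))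
            && (PySem.Str.pyGet? (PySem.Str.replace (PySem.Str.strip raw) "  " " ") 0 == some ';')))
        = !(isInstruction raw) := by
      rw [semi_test_eq]
      simp [isInstruction]
    by_cases h : isInstruction raw = true
    · -- instruction line
      have hidx : instrIdxs (raw :: rest) = 0 :: (instrIdxs rest).map (· + 1) := by
        simp [instrIdxs, h]
      by_cases hpc : instr = pc
      · -- break: result lc; index pc - instr = 0 hits the head 0
        simp only [realLineLoop, hcond, h, Bool.not_true, Bool.false_eq_true, if_false]
        have hbeq : (instr == pc) = true := by simp [hpc]
        rw [if_pos hbeq, hidx, if_pos (by push_cast [List.length_cons]; omega)]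
        simp [hpc, PySem.List.pyGetD_zero_cons]
      · simp only [realLineLoop, hcond, h, Bool.not_true, Bool.false_eq_true, if_false]
        rw [if_neg (by simpa using hpc), ih, hidx]
        by_cases hge : 0 ≤ pc - (instr + 1) ∧ pc - (instr + 1) < ((instrIdxs rest).length : Int)
        · rw [if_pos hge, if_pos (by push_cast [List.length_cons, List.length_map]; omega)]
          rw [PySem.List.pyGetD_eq_getElem _ _ hge.1 hge.2,
              PySem.List.pyGetD_eq_getElem _ _ (by omega) (by push_cast [List.length_cons, List.length_map]; omega)]
          have hts : (pc - instr).toNat = (pc - (instr + 1)).toNat + 1 := by omega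
          simp [hts]
          ring
        · rw [if_neg hge, if_neg (by push_cast [List.length_cons, List.length_map] at hge ⊢; omega)]
          push_cast [List.length_cons]
          ring
    · -- non-instruction line
      simp only [Bool.not_eq_true] at h
      have hidx : instrIdxs (raw :: rest) = (instrIdxs rest).map (· + 1) := by
        simp [instrIdxs, h]
      simp only [realLineLoop, hcond, h, Bool.not_false, if_true]
      rw [ih, hidx]
      simp only [List.length_map]
      by_cases hge : 0 ≤ pc - instr ∧ pc - instr < ((instrIdxs rest).length : Int)
      · rw [if_pos hge, if_pos hge]
        rw [PySem.List.pyGetD_eq_getElem _ _ hge.1 hge.2,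
            PySem.List.pyGetD_eq_getElem _ _ hge.1 (by simpa using hge.2)]
        simp [List.getElem_map]
        ring
      · rw [if_neg hge, if_neg hge]
        push_cast [List.length_cons]
        ring

-- ===== VERDICT (by name: the statement is the Claim_ definition above) =====
theorem real_line_spec : Claim_equal_real_line := by
  intro contents pc _
  unfold Spec_real_line real_line real_line_alt
  have hmap0 : ∀ l : List Int, l.map (· + (0:Int)) = l := fun l => by simp
  simp only [realLineLoop_eq, enumerate_filter_map_eq, hmap0, sub_zero, zero_add]
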